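-- pv_equiv track=rewrite | github.com/bobeobibo/phigaro | phigaro/phigaro.py | count_grad
-- ===== SOURCE A (Python) =====
-- import math
--
-- def count_grad(sequence, window_size):
--     # input: 'NPPPNNPNPN??NP'-like sequence converted to [0,1,1,1,0,0,1,0,1,0,0,0,0,1], list type
--     grad = []
--     offset = math.floor(window_size / 2)
--     for i in range(0, len(sequence)):  # for all values
--         grad.append(0)
--         start = int(i - offset)
--         if start < 0:  # if start is negative
--             start = 0
--         end = int(i + offset)
--         if end > len(sequence) - 1:  # if end is out of range
--             end = len(sequence) - 1
--         grad[i] += sum(sequence[start:end + 1])  # count sum of elements in window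
--     return grad
-- ===== SOURCE B (Python) =====
-- def count_grad(sequence, window_size):
--     offset = window_size // 2
--     prefix = [0]
--     for v in sequence:
--         prefix.append(prefix[-1] + v)
--     n = len(sequence)
--     return [prefix[min(n, i + offset + 1)] - prefix[max(0, i - offset)]
--             for i in range(n)]
-- ===== Notes on version B (the rewrite author's own statement) =====
-- stated objective: faster
-- what changed: replaces the per-position window slice-and-sum (O(n*w)) with a single prefix-sum array and one O(1) subtraction per position
-- outside the precondition, e.g. on count_grad([1, 2, 3, 4], -4): A returns [3, 0, 0, 0], B raises IndexError; on count_grad([1, 2, 3], -1): A returns [0, 0, 0], B returns [-1, -2, -3]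
import Mathlib
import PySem

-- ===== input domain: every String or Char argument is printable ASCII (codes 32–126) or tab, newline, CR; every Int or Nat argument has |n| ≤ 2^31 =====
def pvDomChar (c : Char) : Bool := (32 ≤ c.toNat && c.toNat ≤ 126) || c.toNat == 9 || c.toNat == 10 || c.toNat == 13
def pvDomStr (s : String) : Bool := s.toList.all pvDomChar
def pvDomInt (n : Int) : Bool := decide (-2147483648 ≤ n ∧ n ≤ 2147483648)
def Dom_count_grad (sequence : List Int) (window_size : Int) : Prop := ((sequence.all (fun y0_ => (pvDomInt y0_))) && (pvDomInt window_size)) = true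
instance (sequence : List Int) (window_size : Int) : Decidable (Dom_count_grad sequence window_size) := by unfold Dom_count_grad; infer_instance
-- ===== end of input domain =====

-- B replaces A's per-position window slice-and-sum with a prefix-sum array and one subtraction per position (asymptotically faster).


-- ===== PORT A =====
def count_grad (sequence : List Int) (window_size : Int) : List Int :=
  let offset : Int := PySem.Int.floordiv window_size 2   -- math.floor(window_size / 2), exact for |n| ≤ 2^31
  (PySem.List.pyRange 0 (PySem.List.len sequence) 1).foldl (fun grad i =>
    let grad := grad ++ [(0 : Int)]                      -- grad.append(0)
    let start := i - offset
    let start := if start < 0 then 0 else start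
    let e := i + offset
    let e := if e > PySem.List.len sequence - 1 then PySem.List.len sequence - 1 else e
    -- grad[i] += sum(sequence[start:end + 1])
    PySem.List.pySetD grad i
      (PySem.List.pyGetD grad i 0 + (PySem.List.slice sequence (some start) (some (e + 1))).sum)) []

-- ===== PORT B =====
def count_grad_alt (sequence : List Int) (window_size : Int) : List Int :=
  let offset : Int := PySem.Int.floordiv window_size 2
  -- prefix[x] indexing: exact wherever Python returns (all indices lie in range under Pre_; .getD 0 only pads where Python would raise, outside Pre_)
  let pref : List Int := sequence.foldl
    (fun p v => p ++ [(PySem.List.pyGet? p (-1)).getD 0 + v]) [(0 : Int)]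
  let n : Int := PySem.List.len sequence
  (PySem.List.pyRange 0 n 1).map (fun i =>
    (PySem.List.pyGet? pref (min n (i + offset + 1))).getD 0
      - (PySem.List.pyGet? pref (max 0 (i - offset))).getD 0)

-- ===== PRECONDITION & SPEC =====
-- Pre_ restricts to the natural domain of a window size: 0 ≤ window_size. A does return values for
-- negative window sizes, but those are an artefact of Python's negative-slice wraparound (see cites).
def Pre_count_grad (sequence : List Int) (window_size : Int) : Prop := 0 ≤ window_size
instance (sequence : List Int) (window_size : Int) : Decidable (Pre_count_grad sequence window_size) := by unfold Pre_count_grad; infer_instance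
def pvWitness_count_grad : List Int × Int := ([1, 0, 1, 1, 0], 3)

def Spec_count_grad (sequence : List Int) (window_size : Int) (out : List Int) : Prop := out = count_grad_alt sequence window_size
instance (sequence : List Int) (window_size : Int) (out : List Int) : Decidable (Spec_count_grad sequence window_size out) := by unfold Spec_count_grad; infer_instance

-- ===== CLAIM (what is proved, stated in full; the proofs are below) =====
def Claim_equal_count_grad : Prop := ∀ (sequence : List Int) (window_size : Int), Dom_count_grad sequence window_size → Pre_count_grad sequence window_size → Spec_count_grad sequence window_size (count_grad sequence window_size)

-- ===== LEMMAS AND PROOFS =====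

-- B's prefix-building loop produces the list of partial sums.
lemma prefix_fold_eq (xs : List Int) (p : List Int) (a : Int) (h : p.getLast? = some a) :
    xs.foldl (fun p v => p ++ [(PySem.List.pyGet? p (-1)).getD 0 + v]) p
      = p ++ (List.range xs.length).map (fun k => a + ((xs.take (k + 1)).sum)) := by
  induction xs generalizing p a with
  | nil => simp
  | cons v xs ih =>
    simp only [PySem.List.pyGet?_neg_one] at ih ⊢
    simp only [List.foldl_cons, h, Option.getD_some]
    rw [ih (p ++ [a + v]) (a + v) (by simp)]
    simp [List.range_succ_eq_map, List.map_map, List.append_assoc, Function.comp,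
      add_assoc]

lemma prefix_eq (xs : List Int) :
    xs.foldl (fun p v => p ++ [(PySem.List.pyGet? p (-1)).getD 0 + v]) [(0 : Int)]
      = (List.range (xs.length + 1)).map (fun k => ((xs.take k).sum : Int)) := by
  rw [prefix_fold_eq xs [0] 0 (by simp)]
  rw [List.range_succ_eq_map]
  simp

-- sum of a drop/take window is a difference of prefix sums
lemma sum_drop_take (xs : List Int) (a b : Nat) (hab : a ≤ b) :
    (((xs.drop a).take (b - a)).sum : Int) = (xs.take b).sum - (xs.take a).sum := by
  have h : xs.take b = xs.take a ++ (xs.drop a).take (b - a) := by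
    rw [← List.take_add]
    congr 1
    omega
  rw [h, List.sum_append]
  ring

-- A's loop, written as a map over the range
lemma count_grad_eq_map (sequence : List Int) (offset : Int) (g : Int → Int)
    (hg : ∀ i, 0 ≤ i → g i =
      (PySem.List.slice sequence
          (some (if i - offset < 0 then 0 else i - offset))
          (some ((if i + offset > PySem.List.len sequence - 1 then PySem.List.len sequence - 1 else i + offset) + 1))).sum)
    (b : Int) (hb : 0 ≤ b) :
    (PySem.List.pyRange 0 b 1).foldl (fun grad i =>
      let grad := grad ++ [(0 : Int)]
      let start := i - offset
      let start := if start < 0 then 0 else start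
      let e := i + offset
      let e := if e > PySem.List.len sequence - 1 then PySem.List.len sequence - 1 else e
      PySem.List.pySetD grad i
        (PySem.List.pyGetD grad i 0 + (PySem.List.slice sequence (some start) (some (e + 1))).sum)) []
      = (PySem.List.pyRange 0 b 1).map g := by
  induction b, hb using Int.le_induction with
  | base => simp [PySem.List.pyRange_one_eq_nil]
  | succ b hb0 ih =>
    rw [PySem.List.pyRange_one_succ_right (by omega), List.foldl_append, List.map_append, ih]
    simp only [List.foldl_cons, List.foldl_nil, List.map_cons, List.map_nil]
    have hlen : ((PySem.List.pyRange 0 b 1).map g).length = b.toNat := by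
      simp [PySem.List.length_pyRange_one]
    have hget : PySem.List.pyGetD (((PySem.List.pyRange 0 b 1).map g) ++ [(0:Int)]) b 0 = 0 := by
      rw [PySem.List.pyGetD_eq_getElem _ _ (by omega) (by simp [hlen])]
      rw [List.getElem_append_right (by omega)]
      simp [hlen]
    rw [PySem.List.pySetD_of_nonneg _ _ (by omega), hget, zero_add]
    have hbt : b.toNat = ((PySem.List.pyRange 0 b 1).map g).length := hlen.symm
    rw [hbt, List.set_append_right _ _ (le_refl _)]
    simp only [Nat.sub_self, List.set_cons_zero]
    rw [hg b hb0]

-- indexing the list of partial sums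
lemma pre_get (xs : List Int) (j : Int) (h0 : 0 ≤ j) (hn : j ≤ (xs.length : Int)) :
    (PySem.List.pyGet? ((List.range (xs.length + 1)).map (fun k => ((xs.take k).sum : Int))) j).getD 0
      = (xs.take j.toNat).sum := by
  rw [PySem.List.pyGet?_of_nonneg _ h0]
  rw [List.getElem?_eq_getElem (by simp; omega)]
  simp

-- the per-index values of A and B agree (window_size ≥ 0)
lemma elem_eq (sequence : List Int) (offset : Int) (hoff : 0 ≤ offset) (i : Int)
    (h0 : 0 ≤ i) (hn : i < (sequence.length : Int)) :
    (PySem.List.slice sequence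
        (some (if i - offset < 0 then 0 else i - offset))
        (some ((if i + offset > PySem.List.len sequence - 1 then PySem.List.len sequence - 1 else i + offset) + 1))).sum
      = (PySem.List.pyGet? ((List.range (sequence.length + 1)).map (fun k => ((sequence.take k).sum : Int)))
            (min (PySem.List.len sequence) (i + offset + 1))).getD 0
        - (PySem.List.pyGet? ((List.range (sequence.length + 1)).map (fun k => ((sequence.take k).sum : Int)))
            (max 0 (i - offset))).getD 0 := by
  have hlo : (if i - offset < 0 then 0 else i - offset) = max 0 (i - offset) := by omega
  have hhi : ((if i + offset > PySem.List.len sequence - 1 then PySem.List.len sequence - 1 else i + offset) + 1)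
      = min (PySem.List.len sequence) (i + offset + 1) := by
    simp only [PySem.List.len_eq]
    omega
  rw [hlo, hhi]
  set lo := max 0 (i - offset) with hlodef
  set hi := min (PySem.List.len sequence) (i + offset + 1) with hhidef
  have hlo0 : 0 ≤ lo := by omega
  have hhi0 : 0 ≤ hi := by simp only [hhidef, PySem.List.len_eq]; omega
  have hlole : lo ≤ (sequence.length : Int) := by simp only [hlodef]; omega
  have hhile : hi ≤ (sequence.length : Int) := by simp only [hhidef, PySem.List.len_eq]; omega
  have hlohi : lo ≤ hi := by simp only [hlodef, hhidef, PySem.List.len_eq]; omega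
  rw [pre_get sequence hi hhi0 hhile, pre_get sequence lo hlo0 hlole]
  rw [PySem.List.slice_toNat sequence hlo0 hhi0]
  exact sum_drop_take sequence lo.toNat hi.toNat (by omega)

-- ===== VERDICT (by name: the statement is the Claim_ definition above) =====
theorem count_grad_spec : Claim_equal_count_grad := by
  intro sequence window_size _hdom hpre
  unfold Spec_count_grad count_grad count_grad_alt
  have hoff : 0 ≤ PySem.Int.floordiv window_size 2 := by
    rw [PySem.Int.floordiv_eq_ediv_of_pos (by omega)]
    exact Int.ediv_nonneg hpre (by omega)
  set offset := PySem.Int.floordiv window_size 2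
  rw [prefix_eq sequence]
  rw [count_grad_eq_map sequence offset _ (fun i _ => rfl) (PySem.List.len sequence)
    (by simp [PySem.List.len_eq])]
  apply List.map_congr_left
  intro i hi
  rw [PySem.List.mem_pyRange_one] at hi
  simp only [PySem.List.len_eq] at hi
  exact elem_eq sequence offset hoff i hi.1 hi.2
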